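-- pv_equiv track=rewrite | github.com/DanielFijolek/cryptography_tasks | vigenere_cipher.py | split_tab
-- ===== SOURCE A (Python) =====
-- def split_tab(text, l_kol):
--     text_pod = []
--     text_tab = []
--     i = 0
--     n = 0
--     for char in text:
--         text_tab.append(char)
--     while (i < l_kol):
--         text_pod.append(text_tab[i::l_kol])
--         i += 1
--     return (text_pod)
-- ===== SOURCE B (Python) =====
-- def split_tab(text, l_kol):
--     if l_kol < 1:
--         return []
--     columns = [[] for _ in range(l_kol)]
--     for pos, char in enumerate(text):
--         columns[pos % l_kol].append(char)
--     return columns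
-- ===== Notes on version B (the rewrite author's own statement) =====
-- stated objective: alternative
-- what changed: B replaces A's column-major repeated strided slicing (one slice text[i::l_kol] per column) by a single row-major pass that distributes each character into bucket pos % l_kol, with an empty result for l_kol < 1 as A yields.
import Mathlib
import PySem

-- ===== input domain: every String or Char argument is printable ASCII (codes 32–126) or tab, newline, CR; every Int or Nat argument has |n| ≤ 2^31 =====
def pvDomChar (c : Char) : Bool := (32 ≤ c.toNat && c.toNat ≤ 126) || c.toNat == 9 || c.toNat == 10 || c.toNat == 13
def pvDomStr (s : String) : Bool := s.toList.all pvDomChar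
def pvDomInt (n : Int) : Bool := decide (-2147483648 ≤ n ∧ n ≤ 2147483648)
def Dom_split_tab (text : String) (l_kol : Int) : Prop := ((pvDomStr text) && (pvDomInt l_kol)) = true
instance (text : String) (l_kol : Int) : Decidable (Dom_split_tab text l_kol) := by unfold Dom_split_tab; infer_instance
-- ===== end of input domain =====

-- B distributes characters into l_kol buckets in one row-major pass instead of A's
-- per-column strided slicing; same return value everywhere (alternative decomposition).


-- ===== PORT A =====
-- for char in text: text_tab.append(char); then while i < l_kol: append text_tab[i::l_kol].
-- Inside the loop 0 ≤ i < l_kol, so the step l_kol is nonzero and slice? is always `some`;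
-- the `.getD []` is never the `none` branch.
def split_tab (text : String) (l_kol : Int) : List (List String) :=
  let text_tab : List String := text.toList.map (fun c => String.ofList [c])
  (PySem.List.pyRange 0 l_kol 1).foldl
    (fun text_pod i =>
      text_pod ++ [(PySem.List.slice? text_tab (some i) none l_kol).getD []]) []

-- ===== PORT B =====
-- if l_kol < 1: return []; columns = [[] for _ in range(l_kol)];
-- for pos, char in enumerate(text): columns[pos % l_kol].append(char)
def split_tab_alt (text : String) (l_kol : Int) : List (List String) :=
  if l_kol < 1 then []
  else
    (PySem.List.enumerate (text.toList.map (fun c => String.ofList [c])) 0).foldl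
      (fun columns p =>
        columns.set (PySem.Int.mod p.1 l_kol).toNat
          (columns.getD (PySem.Int.mod p.1 l_kol).toNat [] ++ [p.2]))
      (List.replicate l_kol.toNat [])

-- ===== PRECONDITION & SPEC =====
def Spec_split_tab (text : String) (l_kol : Int) (out : List (List String)) : Prop := out = split_tab_alt text l_kol
instance (text : String) (l_kol : Int) (out : List (List String)) : Decidable (Spec_split_tab text l_kol out) := by unfold Spec_split_tab; infer_instance

-- ===== CLAIM (what is proved, stated in full; the proofs are below) =====
def Claim_equal_split_tab : Prop := ∀ (text : String) (l_kol : Int), Dom_split_tab text l_kol → Spec_split_tab text l_kol (split_tab text l_kol)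

-- ===== LEMMAS AND PROOFS =====

-- The characters of cs that land in column j when counting positions from s (mod Ln).
def pvColPart {α : Type} (Ln : Nat) : List α → Nat → Nat → List α
  | [], _, _ => []
  | c :: t, s, j => (if s % Ln = j then [c] else []) ++ pvColPart Ln t (s + 1) j

lemma pv_slice_nil {α : Type} (d L : Int) (hd : 0 ≤ d) (hL : 0 < L) :
    PySem.List.slice? ([] : List α) (some d) none L = some [] := by
  simp only [PySem.List.slice?, PySem.List.sliceIndices, List.length_nil]
  have h1 : ¬ (L < 0) := by omega
  have h2 : ¬ (L = 0) := by omega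
  have h3 : ¬ (d < 0) := by omega
  simp only [if_neg h1, if_neg h2, if_neg h3, if_pos hL]
  have hm : min d ((0:Nat):Int) = 0 := by simp; omega
  rw [hm]
  simp

lemma pv_slice_shift {α : Type} (c : α) (t : List α) (j L : Int) (hj : 0 ≤ j) (hL : 0 < L) :
    PySem.List.slice? (c :: t) (some (j + 1)) none L = PySem.List.slice? t (some j) none L := by
  simp only [PySem.List.slice?, PySem.List.sliceIndices, List.length_cons]
  have h1 : ¬ (L < 0) := by omega
  have h2 : ¬ (L = 0) := by omega
  have h3 : ¬ (j + 1 < 0) := by omega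
  have h4 : ¬ (j < 0) := by omega
  simp only [if_neg h1, if_neg h2, if_neg h3, if_neg h4, if_pos hL]
  push_cast
  have hmin : min (j + 1) ((t.length : Int) + 1) = min j (t.length : Int) + 1 := by omega
  rw [hmin]
  have hm0 : 0 ≤ min j (t.length : Int) := by omega
  set m := min j (t.length : Int) with hm
  by_cases hc : m < (t.length : Int)
  · rw [if_pos (by omega : m + 1 < (t.length : Int) + 1), if_pos hc]
    have hcnt : ((t.length : Int) + 1 - (m + 1) + L - 1) = ((t.length : Int) - m + L - 1) := by ring
    rw [hcnt]
    congr 1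
    apply List.filterMap_congr
    intro k _
    have hidx : (m + 1 + L * (k : Int)).toNat = (m + L * (k : Int)).toNat + 1 := by
      have : 0 ≤ L * (k : Int) := by positivity
      omega
    rw [hidx, List.getElem?_cons_succ]
  · rw [if_neg (by omega : ¬ (m + 1 < (t.length : Int) + 1)), if_neg hc]
    simp

lemma pv_slice_head {α : Type} (c : α) (t : List α) (L : Int) (hL : 0 < L) :
    PySem.List.slice? (c :: t) (some 0) none L
      = some (c :: (PySem.List.slice? t (some (L - 1)) none L).getD []) := by
  simp only [PySem.List.slice?, PySem.List.sliceIndices, List.length_cons]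
  have h1 : ¬ (L < 0) := by omega
  have h2 : ¬ (L = 0) := by omega
  have h4 : ¬ (L - 1 < 0) := by omega
  simp only [if_neg h1, if_neg h2, if_neg h4, if_pos hL]
  push_cast
  rw [min_eq_left (by omega : (0 : Int) ≤ (t.length : Int) + 1)]
  rw [if_pos (by omega : (0 : Int) < (t.length : Int) + 1)]
  set n : Int := (t.length : Int) with hn
  have hn0 : 0 ≤ n := by positivity
  by_cases hc : L - 1 < n
  · rw [min_eq_left (by omega : L - 1 ≤ n), if_pos hc]
    have hcnt : ((n + 1 - 0 + L - 1) / L).toNat = ((n - (L - 1) + L - 1) / L).toNat + 1 := by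
      have he : (n + 1 - 0 + L - 1) = (n - (L - 1) + L - 1) + 1 * L := by ring
      rw [he, Int.add_mul_ediv_right _ _ (by omega : L ≠ 0)]
      have hpos : 0 ≤ (n - (L - 1) + L - 1) / L := Int.ediv_nonneg (by omega) (by omega)
      omega
    rw [hcnt, List.range_succ_eq_map, List.filterMap_cons]
    have hidx0 : ((0 : Int) + L * ((0 : Nat) : Int)).toNat = 0 := by simp
    rw [hidx0]
    simp only [List.getElem?_cons_zero, Option.some.injEq, Option.getD_some]
    congr 1
    rw [List.filterMap_map]
    apply List.filterMap_congr
    intro k _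
    simp only [Function.comp_apply]
    have hidx : ((0 : Int) + L * ((Nat.succ k : Nat) : Int)).toNat = (L - 1 + L * (k : Int)).toNat + 1 := by
      have hk : 0 ≤ L * (k : Int) := by positivity
      push_cast
      have hd : L * ((k : Int) + 1) = L * (k : Int) + L := by ring
      omega
    rw [hidx, List.getElem?_cons_succ]
  · rw [min_eq_right (by omega : n ≤ L - 1), if_neg (by omega : ¬ (n < n))]
    have hcnt1 : ((n + 1 - 0 + L - 1) / L).toNat = 1 := by
      have he : (n + 1 - 0 + L - 1) = n + 1 * L := by ring
      rw [he, Int.add_mul_ediv_right _ _ (by omega : L ≠ 0),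
        Int.ediv_eq_zero_of_lt hn0 (by omega : n < L)]
      rfl
    rw [hcnt1]
    simp

-- A's column: the strided slice starting at (j - s) mod Ln is exactly pvColPart.
lemma pv_slice_colPart {α : Type} (Ln : Nat) (hLn : 0 < Ln) :
    ∀ (cs : List α) (s j : Nat), j < Ln →
      (PySem.List.slice? cs (some (((j : Int) - (s : Int)) % (Ln : Int))) none (Ln : Int)).getD []
        = pvColPart Ln cs s j := by
  intro cs
  induction cs with
  | nil =>
      intro s j hj
      rw [pv_slice_nil _ _ (Int.emod_nonneg _ (by exact_mod_cast hLn.ne')) (by exact_mod_cast hLn)]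
      rfl
  | cons c t ih =>
      intro s j hj
      have hLpos : (0 : Int) < (Ln : Int) := by exact_mod_cast hLn
      have hLne : ((Ln : Int)) ≠ 0 := by omega
      by_cases hsj : s % Ln = j
      · have hjs : ((j : Int)) % (Ln : Int) = ((s : Int)) % (Ln : Int) := by
          have e1 : ((s % Ln : Nat) : Int) = (s : Int) % (Ln : Int) := by push_cast; ring
          have e2 : ((j % Ln : Nat) : Int) = (j : Int) % (Ln : Int) := by push_cast; ring
          rw [← e1, ← e2, hsj, Nat.mod_eq_of_lt hj]
        have hd0 : ((j : Int) - (s : Int)) % (Ln : Int) = 0 :=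
          Int.emod_eq_emod_iff_emod_sub_eq_zero.mp hjs
        rw [hd0, pv_slice_head c t _ hLpos, Option.getD_some]
        obtain ⟨k, hk⟩ := Int.dvd_of_emod_eq_zero hd0
        have hnext : ((j : Int) - ((s + 1 : Nat) : Int)) % (Ln : Int) = (Ln : Int) - 1 := by
          have he : (j : Int) - ((s + 1 : Nat) : Int) = ((Ln : Int) - 1) + (Ln : Int) * (k - 1) := by
            push_cast
            linear_combination hk
          rw [he, Int.add_mul_emod_self_left, Int.emod_eq_of_lt (by omega) (by omega)]
        rw [← hnext, ih (s + 1) j hj]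
        simp [pvColPart, hsj]
      · have hdnn : 0 ≤ ((j : Int) - (s : Int)) % (Ln : Int) := Int.emod_nonneg _ hLne
        have hdlt : ((j : Int) - (s : Int)) % (Ln : Int) < (Ln : Int) := Int.emod_lt_of_pos _ hLpos
        have hdne : ((j : Int) - (s : Int)) % (Ln : Int) ≠ 0 := by
          intro h0
          apply hsj
          have hjs := Int.emod_eq_emod_iff_emod_sub_eq_zero.mpr h0
          have e1 : ((s % Ln : Nat) : Int) = (s : Int) % (Ln : Int) := by push_cast; ring
          have e2 : ((j : Int)) % (Ln : Int) = (j : Int) := Int.emod_eq_of_lt (by positivity) (by exact_mod_cast hj)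
          have : ((s % Ln : Nat) : Int) = (j : Int) := by rw [e1, ← hjs, e2]
          exact_mod_cast this
        set d := ((j : Int) - (s : Int)) % (Ln : Int) with hdd
        have hd1 : d = (d - 1) + 1 := by omega
        rw [hd1, pv_slice_shift c t (d - 1) _ (by omega) hLpos]
        have hdm := Int.emod_add_mul_ediv ((j : Int) - (s : Int)) (Ln : Int)
        have hnext : ((j : Int) - ((s + 1 : Nat) : Int)) % (Ln : Int) = d - 1 := by
          have he : (j : Int) - ((s + 1 : Nat) : Int)
              = (d - 1) + (Ln : Int) * (((j : Int) - (s : Int)) / (Ln : Int)) := by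
            push_cast
            linear_combination hdm.symm
          rw [he, Int.add_mul_emod_self_left, Int.emod_eq_of_lt (by omega) (by omega)]
        rw [← hnext, ih (s + 1) j hj]
        simp [pvColPart, hsj]

-- B's fold: distributing cs (positions starting at s) into an accumulator of Ln buckets.
lemma pv_foldl_enum (Ln : Nat) :
    ∀ (cs : List String) (s : Nat) (cols : List (List String)), cols.length = Ln →
      (PySem.List.enumerate cs ((s : Nat) : Int)).foldl
        (fun columns p =>
          columns.set (PySem.Int.mod p.1 (Ln : Int)).toNat
            (columns.getD (PySem.Int.mod p.1 (Ln : Int)).toNat [] ++ [p.2])) cols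
      = (List.range Ln).map (fun j => cols.getD j [] ++ pvColPart Ln cs s j) := by
  intro cs
  induction cs with
  | nil =>
      intro s cols hlen
      simp only [PySem.List.enumerate_nil, List.foldl_nil, pvColPart, List.append_nil]
      apply List.ext_getElem
      · simp [hlen]
      · intro i hi hi2
        have hiL : i < Ln := by simpa using hi2
        have hic : i < cols.length := by omega
        simp [List.getD_eq_getElem?_getD, List.getElem?_eq_getElem hic]
  | cons c t ih =>
      intro s cols hlen
      have hcast : ((s : Nat) : Int) + 1 = (((s + 1 : Nat)) : Int) := by push_cast; ring
      rw [PySem.List.enumerate_cons, List.foldl_cons, hcast]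
      have hmod : (PySem.Int.mod ((s : Nat) : Int) (Ln : Int)).toNat = s % Ln := by
        rw [PySem.Int.mod_natCast]
        exact Int.toNat_natCast _
      rw [hmod]
      have hlen' : (cols.set (s % Ln) (cols.getD (s % Ln) [] ++ [c])).length = Ln := by
        simp [hlen]
      rw [ih (s + 1) _ hlen']
      apply List.map_congr_left
      intro j hj
      have hjL : j < Ln := List.mem_range.mp hj
      have hjc : j < cols.length := by omega
      by_cases hc : s % Ln = j
      · subst hc
        have hset : (cols.set (s % Ln) (cols.getD (s % Ln) [] ++ [c])).getD (s % Ln) []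
            = cols.getD (s % Ln) [] ++ [c] := by
          have hlt : s % Ln < (cols.set (s % Ln) (cols.getD (s % Ln) [] ++ [c])).length := by
            simp [hlen]; omega
          rw [List.getD_eq_getElem?_getD, List.getElem?_eq_getElem hlt,
            List.getElem_set_self]
          rfl
        rw [hset]
        simp [pvColPart]
      · have hset : (cols.set (s % Ln) (cols.getD (s % Ln) [] ++ [c])).getD j []
            = cols.getD j [] := by
          have hlt : j < (cols.set (s % Ln) (cols.getD (s % Ln) [] ++ [c])).length := by
            simp [hlen]; omega
          rw [List.getD_eq_getElem?_getD, List.getElem?_eq_getElem hlt,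
            List.getElem_set_ne hc]
          simp [List.getD_eq_getElem?_getD, List.getElem?_eq_getElem hjc]
        rw [hset]
        simp [pvColPart, hc]

-- ===== VERDICT (by name: the statement is the Claim_ definition above) =====
theorem split_tab_spec : Claim_equal_split_tab := by
  intro text l_kol _dom
  unfold Spec_split_tab split_tab split_tab_alt
  by_cases h : l_kol < 1
  · rw [if_pos h, PySem.List.pyRange_one_eq_nil (by omega : l_kol ≤ 0)]
    rfl
  · rw [if_neg h]
    obtain ⟨Ln, rfl⟩ : ∃ n : Nat, l_kol = (n : Int) :=
      ⟨l_kol.toNat, (Int.toNat_of_nonneg (by omega)).symm⟩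
    have hLn : 0 < Ln := by exact_mod_cast show (0 : Int) < (Ln : Int) by omega
    set cs : List String := text.toList.map (fun c => String.ofList [c]) with hcs
    -- A's while loop over range(l_kol) as a map
    rw [PySem.List.foldl_append_singleton_eq_map, PySem.List.pyRange_one]
    have hR : (((Ln : Int) - 0).toNat) = Ln := by omega
    rw [hR, List.map_map]
    -- B's fold via the bucket invariant, started at position 0 with Ln empty buckets
    have hB := pv_foldl_enum Ln cs 0 (List.replicate ((Ln : Int)).toNat [])
      (by simp [Int.toNat_natCast])
    rw [Nat.cast_zero] at hB
    rw [hB]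
    apply List.map_congr_left
    intro j hj
    have hjL : j < Ln := List.mem_range.mp hj
    simp only [Function.comp_apply, zero_add]
    have hmain := pv_slice_colPart Ln hLn cs 0 j hjL
    rw [Nat.cast_zero, sub_zero,
      Int.emod_eq_of_lt (by positivity) (by exact_mod_cast hjL)] at hmain
    rw [hmain]
    have hrep : (List.replicate ((Ln : Int)).toNat ([] : List String)).getD j [] = [] := by
      simp
    rw [hrep, List.nil_append]
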